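-- pv_equiv track=rewrite | github.com/GitMonsters/Prime-directive | Prime-directive/arc_solver_layer4_6_ttt_ttr.py | _generate_refinement_suggestions
-- ===== SOURCE A (Python) =====
-- from typing import List, Dict, Tuple, Any, Optional, Callable
--
-- def _generate_refinement_suggestions(hypotheses: List) -> List[str]:
--     """Generate suggestions for refining hypotheses"""
--     suggestions = []
--
--     # Suggest focus areas
--     if any(h.get('rule_type') == 'color_mapping' for h in hypotheses):
--         suggestions.append('focus_on_color_rules')
--
--     if any(h.get('rule_type') == 'rotation' for h in hypotheses):
--         suggestions.append('consider_geometric_operations')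
--
--     if any(h.get('domain') == 'symmetry' for h in hypotheses):
--         suggestions.append('preserve_symmetry_patterns')
--
--     return suggestions
-- ===== SOURCE B (Python) =====
-- from typing import List
--
-- def _generate_refinement_suggestions(hypotheses: List) -> List[str]:
--     """Generate suggestions for refining hypotheses (single pass with flags)"""
--     has_color = False
--     has_rotation = False
--     has_symmetry = False
--     for h in hypotheses:
--         rt = h.get('rule_type')
--         if rt == 'color_mapping':
--             has_color = True
--         if rt == 'rotation':
--             has_rotation = True
--         if h.get('domain') == 'symmetry':
--             has_symmetry = True
--         if has_color and has_rotation and has_symmetry: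
--             break
--     suggestions = []
--     if has_color:
--         suggestions.append('focus_on_color_rules')
--     if has_rotation:
--         suggestions.append('consider_geometric_operations')
--     if has_symmetry:
--         suggestions.append('preserve_symmetry_patterns')
--     return suggestions
-- ===== Notes on version B (the rewrite author's own statement) =====
-- stated objective: alternative
-- what changed: Replaces three separate any(...) scans over hypotheses with a single pass that maintains three booleans and breaks early once all three are set, then emits the suggestions from the flags.
import Mathlib
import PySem

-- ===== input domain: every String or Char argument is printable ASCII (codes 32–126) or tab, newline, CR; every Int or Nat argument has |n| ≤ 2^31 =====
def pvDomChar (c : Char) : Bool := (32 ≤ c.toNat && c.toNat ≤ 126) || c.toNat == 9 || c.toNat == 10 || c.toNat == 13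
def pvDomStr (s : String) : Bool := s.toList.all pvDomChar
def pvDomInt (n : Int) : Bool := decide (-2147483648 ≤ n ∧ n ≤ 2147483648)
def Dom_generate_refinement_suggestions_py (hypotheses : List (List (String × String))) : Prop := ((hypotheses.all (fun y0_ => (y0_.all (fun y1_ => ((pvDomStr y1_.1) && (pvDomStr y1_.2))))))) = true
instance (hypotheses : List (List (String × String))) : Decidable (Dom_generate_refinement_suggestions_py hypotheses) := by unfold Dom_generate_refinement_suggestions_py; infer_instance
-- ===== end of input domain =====

-- B does one pass with three flags and an early break instead of A's three any(...) scans; same output.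

-- ===== PORT A =====
-- h.get(k): Python dict lookup, ported as PySem.Dict.get? on the association list.
def pvAttr (h : List (String × String)) (k : String) : Option String :=
  (PySem.Dict.mk h).get? k

def generate_refinement_suggestions_py (hypotheses : List (List (String × String))) : List String :=
  let suggestions : List String := []
  let suggestions :=
    if hypotheses.any (fun h => pvAttr h "rule_type" == some "color_mapping")
    then suggestions ++ ["focus_on_color_rules"] else suggestions
  let suggestions :=
    if hypotheses.any (fun h => pvAttr h "rule_type" == some "rotation")
    then suggestions ++ ["consider_geometric_operations"] else suggestions
  let suggestions :=
    if hypotheses.any (fun h => pvAttr h "domain" == some "symmetry")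
    then suggestions ++ ["preserve_symmetry_patterns"] else suggestions
  suggestions

-- ===== PORT B =====
-- the single-pass for-loop of Source B: carries the three flags, breaks when all are set
def pvAltLoop (hs : List (List (String × String))) (c r s : Bool) : Bool × Bool × Bool :=
  match hs with
  | [] => (c, r, s)
  | h :: rest =>
    let rt := pvAttr h "rule_type"
    let c := if rt == some "color_mapping" then true else c
    let r := if rt == some "rotation" then true else r
    let s := if pvAttr h "domain" == some "symmetry" then true else s
    if c && r && s then (c, r, s) else pvAltLoop rest c r s

def generate_refinement_suggestions_py_alt (hypotheses : List (List (String × String))) : List String :=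
  let (c, r, s) := pvAltLoop hypotheses false false false
  let suggestions : List String := []
  let suggestions := if c then suggestions ++ ["focus_on_color_rules"] else suggestions
  let suggestions := if r then suggestions ++ ["consider_geometric_operations"] else suggestions
  let suggestions := if s then suggestions ++ ["preserve_symmetry_patterns"] else suggestions
  suggestions

-- ===== PRECONDITION & SPEC =====
def Spec_generate_refinement_suggestions_py (hypotheses : List (List (String × String))) (out : List String) : Prop := out = generate_refinement_suggestions_py_alt hypotheses
instance (hypotheses : List (List (String × String))) (out : List String) : Decidable (Spec_generate_refinement_suggestions_py hypotheses out) := by unfold Spec_generate_refinement_suggestions_py; infer_instance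

-- ===== CLAIM (what is proved, stated in full; the proofs are below) =====
def Claim_equal_generate_refinement_suggestions_py : Prop := ∀ (hypotheses : List (List (String × String))), Dom_generate_refinement_suggestions_py hypotheses → Spec_generate_refinement_suggestions_py hypotheses (generate_refinement_suggestions_py hypotheses)

-- ===== LEMMAS AND PROOFS =====
theorem pvAltLoop_eq (hs : List (List (String × String))) (c r s : Bool) :
    pvAltLoop hs c r s =
      (c || hs.any (fun h => pvAttr h "rule_type" == some "color_mapping"),
       r || hs.any (fun h => pvAttr h "rule_type" == some "rotation"),
       s || hs.any (fun h => pvAttr h "domain" == some "symmetry")) := by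
  induction hs generalizing c r s with
  | nil => simp [pvAltLoop]
  | cons h rest ih =>
    simp only [pvAltLoop, List.any_cons]
    generalize (pvAttr h "rule_type" == some "color_mapping") = a
    generalize (pvAttr h "rule_type" == some "rotation") = b
    generalize (pvAttr h "domain" == some "symmetry") = d
    cases a <;> cases b <;> cases d <;> cases c <;> cases r <;> cases s <;>
      simp [ih]

-- ===== VERDICT (by name: the statement is the Claim_ definition above) =====
theorem generate_refinement_suggestions_py_spec : Claim_equal_generate_refinement_suggestions_py := by
  intro hypotheses _
  unfold Spec_generate_refinement_suggestions_py generate_refinement_suggestions_py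
    generate_refinement_suggestions_py_alt
  rw [pvAltLoop_eq]
  simp
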